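-- pv_equiv track=rewrite | github.com/gitwalter/ai-dev-agent | utils/carnap_logical_rule_analyzer.py | _decompose_to_atomic
-- ===== SOURCE A (Python) =====
-- from typing import Dict, List, Set, Tuple, Any
--
-- def _decompose_to_atomic(behavior: str) -> List[str]:
--     """Decompose complex behavior into atomic elements."""
--     # Patterns for complex behaviors
--     conjunctive_patterns = [" and ", " & ", " + "]
--     disjunctive_patterns = [" or ", " | "]
--     conditional_patterns = ["if ", "when ", "unless "]
--
--     atomic_elements = []
--
--     # Split on conjunctive patterns first
--     parts = [behavior]
--     for pattern in conjunctive_patterns: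
--         new_parts = []
--         for part in parts:
--             new_parts.extend(part.split(pattern))
--         parts = new_parts
--
--     # Clean and filter
--     for part in parts:
--         clean_part = part.strip()
--         if len(clean_part) > 10 and not any(p in clean_part.lower() for p in ["example", "note", "see"]):
--             atomic_elements.append(clean_part)
--
--     return atomic_elements
-- ===== SOURCE B (Python) =====
-- def _decompose_to_atomic(behavior: str):
--     """Decompose complex behavior into atomic elements.
--
--     Recursive hierarchical split over the delimiter list + map/filter
--     comprehensions, instead of sequential accumulator-rebuilding loops.
--     """
--     def split_all(text, delims):
--         if not delims:
--             return [text]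
--         return [piece
--                 for part in text.split(delims[0])
--                 for piece in split_all(part, delims[1:])]
--
--     stripped = [p.strip() for p in split_all(behavior, [" and ", " & ", " + "])]
--     return [c for c in stripped
--             if len(c) > 10 and not any(w in c.lower() for w in ("example", "note", "see"))]
-- ===== Notes on version B (the rewrite author's own statement) =====
-- stated objective: simpler
-- what changed: Replaces the pattern loop that rebuilds the parts list with a recursive split over the delimiter list expressed as a nested comprehension (flatMap), and the clean-and-filter accumulator loop with a strip map followed by a filter comprehension.
import Mathlib
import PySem

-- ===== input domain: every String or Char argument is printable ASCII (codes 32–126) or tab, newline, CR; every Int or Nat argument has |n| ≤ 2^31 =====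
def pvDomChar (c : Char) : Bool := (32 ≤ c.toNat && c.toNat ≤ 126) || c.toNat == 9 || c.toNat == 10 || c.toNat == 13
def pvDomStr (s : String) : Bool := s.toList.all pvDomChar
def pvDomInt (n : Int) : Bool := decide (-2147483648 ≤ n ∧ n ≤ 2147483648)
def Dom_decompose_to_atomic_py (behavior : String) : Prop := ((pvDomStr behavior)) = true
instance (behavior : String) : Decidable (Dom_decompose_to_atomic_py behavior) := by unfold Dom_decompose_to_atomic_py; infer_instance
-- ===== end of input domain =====

-- B restructures A's sequential split loops as a recursive flatMap over the delimiter list and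
-- the clean-and-filter loop as a strip map followed by a filter (objective: simpler).

-- s.split(sep) with nonempty literal sep: exact via PySem.Str.split? (none only for sep = "")
def pySplit (s sep : String) : List String := (PySem.Str.split? s sep).getD []

-- ===== PORT A =====
def decompose_to_atomic_py (behavior : String) : List String :=
  let conjunctive_patterns : List String := [" and ", " & ", " + "]
  -- parts = [behavior]; for pattern in ...: new_parts = []; for part in parts: new_parts.extend(part.split(pattern))
  let parts := conjunctive_patterns.foldl
    (fun parts pattern =>
      parts.foldl (fun new_parts part => new_parts ++ pySplit part pattern) [])
    [behavior]
  -- for part in parts: clean_part = part.strip(); if len>10 and not any(...): append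
  parts.foldl (fun atomic_elements part =>
    let clean_part := PySem.Str.strip part
    if PySem.Str.len clean_part > 10 &&
       !(["example", "note", "see"].any (fun p => PySem.Str.isIn p (PySem.Str.lower clean_part)))
    then atomic_elements ++ [clean_part] else atomic_elements) []

-- ===== PORT B =====
-- helper: split_all(text, delims) — recursion over the delimiter list, nested comprehension = flatMap
def pvSplitAll (text : String) : List String → List String
  | [] => [text]
  | d :: rest => (pySplit text d).flatMap (fun part => pvSplitAll part rest)

def decompose_to_atomic_py_alt (behavior : String) : List String :=
  let stripped := (pvSplitAll behavior [" and ", " & ", " + "]).map PySem.Str.strip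
  stripped.filter (fun c =>
    PySem.Str.len c > 10 &&
    !(["example", "note", "see"].any (fun w => PySem.Str.isIn w (PySem.Str.lower c))))

-- ===== PRECONDITION & SPEC =====
def Spec_decompose_to_atomic_py (behavior : String) (out : List String) : Prop := out = decompose_to_atomic_py_alt behavior
instance (behavior : String) (out : List String) : Decidable (Spec_decompose_to_atomic_py behavior out) := by unfold Spec_decompose_to_atomic_py; infer_instance

-- ===== CLAIM (what is proved, stated in full; the proofs are below) =====
def Claim_equal_decompose_to_atomic_py : Prop := ∀ (behavior : String), Dom_decompose_to_atomic_py behavior → Spec_decompose_to_atomic_py behavior (decompose_to_atomic_py behavior)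

-- ===== LEMMAS AND PROOFS =====

-- ===== VERDICT (by name: the statement is the Claim_ definition above) =====
theorem decompose_to_atomic_py_spec : Claim_equal_decompose_to_atomic_py := by
  intro behavior _
  show decompose_to_atomic_py behavior = decompose_to_atomic_py_alt behavior
  simp only [decompose_to_atomic_py, decompose_to_atomic_py_alt, pvSplitAll,
    List.foldl_cons, List.foldl_nil,
    PySem.List.foldl_append_eq_flatMap, PySem.List.foldl_append_if,
    List.nil_append, List.flatMap_singleton, List.flatMap_assoc,
    List.filter_map, Function.comp_def, List.flatMap_singleton']
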